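-- pv_equiv track=rewrite | github.com/LinusKuehne/invariance-for-classification | scripts/causal_chambers/sample_efficiency.py | _get_invariant_subsets
-- ===== SOURCE A (Python) =====
-- import itertools
--
-- def _get_invariant_subsets(name: str, features: list[str]) -> set[frozenset[str]]:
--     """Return ground-truth invariant subsets (same logic as evaluate_all_tests.py)."""
--     if name in ["1a", "1b"]:
--         base_subsets = [
--             frozenset(),
--             frozenset({"red"}),
--             frozenset({"green"}),
--             frozenset({"blue"}),
--             frozenset({"red", "green"}),
--             frozenset({"red", "blue"}),
--             frozenset({"green", "blue"}),
--             frozenset({"red", "green", "blue"}),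
--             frozenset({"red", "green", "blue", "vis_3"}),
--         ]
--         optional_cols = [
--             f for f in features if f not in {"red", "green", "blue", "vis_3", "ir_3"}
--         ]
--         optional_subsets: list[frozenset[str]] = [frozenset()]
--         for r in range(1, len(optional_cols) + 1):
--             for combo in itertools.combinations(optional_cols, r):
--                 optional_subsets.append(frozenset(combo))
--         invariant_subsets: set[frozenset[str]] = set()
--         for base in base_subsets:
--             for opt in optional_subsets:
--                 invariant_subsets.add(base | opt)
--         return invariant_subsets
--
--     if name == "2":
--         base_subsets = [frozenset({"red", "green", "blue"})]
--         optional_cols = [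
--             f for f in features if f not in {"red", "green", "blue", "ir_3", "vis_3"}
--         ]
--         optional_subsets = [frozenset()]
--         for r in range(1, len(optional_cols) + 1):
--             for combo in itertools.combinations(optional_cols, r):
--                 optional_subsets.append(frozenset(combo))
--         invariant_subsets = set()
--         for base in base_subsets:
--             for opt in optional_subsets:
--                 invariant_subsets.add(base | opt)
--         return invariant_subsets
--
--     return set()
-- ===== SOURCE B (Python) =====
-- def _combo_layers(cols):
--     """Pascal-style recursion: layers[k] lists the size-k combinations of cols as frozensets."""
--     if not cols:
--         return [[frozenset()]]
--     rest = _combo_layers(cols[1:])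
--     head = frozenset({cols[0]})
--     return [rest[0]] + [
--         [head | s for s in prev] + nxt
--         for prev, nxt in zip(rest, rest[1:] + [[]])
--     ]
--
--
-- def _get_invariant_subsets(name: str, features: list[str]) -> set[frozenset[str]]:
--     """Ground-truth invariant subsets via a recursive Pascal-triangle layer construction."""
--     if name not in ("1a", "1b", "2"):
--         return set()
--     rgb = ["red", "green", "blue"]
--     if name == "2":
--         bases = [frozenset(rgb)]
--     else:
--         bases = [s for layer in _combo_layers(rgb) for s in layer]
--         bases.append(frozenset(rgb) | {"vis_3"})
--     cols = [f for f in features if f not in {"red", "green", "blue", "vis_3", "ir_3"}]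
--     opts = [s for layer in _combo_layers(cols) for s in layer]
--     return {b | o for b in bases for o in opts}
-- ===== Notes on version B (the rewrite author's own statement) =====
-- stated objective: alternative
-- what changed: Replaces the size-indexed itertools.combinations loops with a recursive Pascal-triangle construction (_combo_layers) that builds all combination layers in one structural recursion over the column list, derives the nine hardcoded base frozensets of the '1a'/'1b' branch as the powerset layers of ['red','green','blue'] plus one vis_3 extension, merges the two duplicated branches into one pipeline, and forms the result as a single set comprehension over bases x opts.
import Mathlib
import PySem

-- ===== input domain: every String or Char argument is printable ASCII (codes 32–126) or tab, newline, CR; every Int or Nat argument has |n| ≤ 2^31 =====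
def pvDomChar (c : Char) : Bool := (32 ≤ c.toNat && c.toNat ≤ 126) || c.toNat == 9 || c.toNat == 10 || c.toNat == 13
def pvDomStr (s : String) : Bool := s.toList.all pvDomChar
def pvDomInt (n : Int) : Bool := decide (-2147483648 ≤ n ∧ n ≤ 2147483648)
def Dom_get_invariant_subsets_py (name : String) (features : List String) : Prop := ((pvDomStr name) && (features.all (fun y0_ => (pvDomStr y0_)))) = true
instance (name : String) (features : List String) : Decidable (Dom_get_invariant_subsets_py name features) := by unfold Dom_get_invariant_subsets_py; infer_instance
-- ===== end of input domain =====

-- B replaces A's per-size itertools.combinations loops and hardcoded base list by one recursive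
-- Pascal-triangle layer construction used for both the base powerset and the optional powerset
-- (alternative decomposition, same asymptotic cost).


-- ===== PORT A =====
def get_invariant_subsets_py (name : String) (features : List String) : List (List String) :=
  if (["1a", "1b"] : List String).contains name then
    let base_subsets : List (List String) :=
      [PySem.Set.ofList [], PySem.Set.ofList ["red"], PySem.Set.ofList ["green"],
       PySem.Set.ofList ["blue"], PySem.Set.ofList ["red", "green"],
       PySem.Set.ofList ["red", "blue"], PySem.Set.ofList ["green", "blue"],
       PySem.Set.ofList ["red", "green", "blue"],
       PySem.Set.ofList ["red", "green", "blue", "vis_3"]]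
    let optional_cols : List String :=
      features.filter (fun f => !((PySem.Set.ofList ["red", "green", "blue", "vis_3", "ir_3"]).contains f))
    let optional_subsets : List (List String) :=
      (PySem.List.pyRange 1 ((optional_cols.length : Int) + 1) 1).foldl
        (fun acc r =>
          (PySem.List.combinations optional_cols r.toNat).foldl
            (fun acc2 combo => acc2 ++ [PySem.Set.ofList combo]) acc)
        [PySem.Set.ofList []]
    base_subsets.foldl
      (fun inv base =>
        optional_subsets.foldl (fun inv2 opt => PySem.Set.add inv2 (PySem.Set.union base opt)) inv)
      ([] : List (List String))
  else if name = "2" then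
    let base_subsets : List (List String) := [PySem.Set.ofList ["red", "green", "blue"]]
    let optional_cols : List String :=
      features.filter (fun f => !((PySem.Set.ofList ["red", "green", "blue", "ir_3", "vis_3"]).contains f))
    let optional_subsets : List (List String) :=
      (PySem.List.pyRange 1 ((optional_cols.length : Int) + 1) 1).foldl
        (fun acc r =>
          (PySem.List.combinations optional_cols r.toNat).foldl
            (fun acc2 combo => acc2 ++ [PySem.Set.ofList combo]) acc)
        [PySem.Set.ofList []]
    base_subsets.foldl
      (fun inv base =>
        optional_subsets.foldl (fun inv2 opt => PySem.Set.add inv2 (PySem.Set.union base opt)) inv)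
      ([] : List (List String))
  else ([] : List (List String))

-- ===== PORT B =====
-- hand port of _combo_layers: layers[k] = size-k combinations of cols as sets, Pascal-style
def pvComboLayers : List String → List (List (List String))
  | [] => [[([] : List String)]]
  | c :: t =>
    let rest := pvComboLayers t
    let head := PySem.Set.ofList [c]
    rest.headD [] ::
      (rest.zip (rest.tail ++ [[]])).map
        (fun p => p.1.map (fun s => PySem.Set.union head s) ++ p.2)

def get_invariant_subsets_py_alt (name : String) (features : List String) : List (List String) :=
  if !((["1a", "1b", "2"] : List String).contains name) then ([] : List (List String))
  else
    let rgb : List String := ["red", "green", "blue"]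
    let bases : List (List String) :=
      if name = "2" then [PySem.Set.ofList rgb]
      else (pvComboLayers rgb).flatten ++
        [PySem.Set.union (PySem.Set.ofList rgb) (PySem.Set.ofList ["vis_3"])]
    let cols : List String :=
      features.filter (fun f => !((PySem.Set.ofList ["red", "green", "blue", "vis_3", "ir_3"]).contains f))
    let opts : List (List String) := (pvComboLayers cols).flatten
    bases.foldl
      (fun inv b => opts.foldl (fun inv2 o => PySem.Set.add inv2 (PySem.Set.union b o)) inv)
      ([] : List (List String))

-- ===== PRECONDITION & SPEC =====
def Spec_get_invariant_subsets_py (name : String) (features : List String) (out : List (List String)) : Prop := out = get_invariant_subsets_py_alt name features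
instance (name : String) (features : List String) (out : List (List String)) : Decidable (Spec_get_invariant_subsets_py name features out) := by unfold Spec_get_invariant_subsets_py; infer_instance

-- ===== CLAIM (what is proved, stated in full; the proofs are below) =====
def Claim_equal_get_invariant_subsets_py : Prop := ∀ (name : String) (features : List String), Dom_get_invariant_subsets_py name features → Spec_get_invariant_subsets_py name features (get_invariant_subsets_py name features)

-- ===== LEMMAS AND PROOFS =====

-- folding Set.add over a deduplicated list equals folding it over the original list
theorem pvFoldl_add_ofList (l : List String) (acc : PySem.Set String) :
    (PySem.Set.ofList l).foldl PySem.Set.add acc = l.foldl PySem.Set.add acc := by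
  have h1 : (PySem.Set.ofList l).foldl PySem.Set.add acc = PySem.Set.update acc (PySem.Set.ofList l) := rfl
  have h2 : l.foldl PySem.Set.add acc = PySem.Set.update acc l := rfl
  rw [h1, h2, PySem.Set.update_eq_append_filter, PySem.Set.update_eq_append_filter,
    PySem.Set.ofList_ofList]

-- {c} | frozenset(combo) = frozenset([c] + combo)
theorem pvUnion_single (c : String) (l : List String) :
    PySem.Set.union (PySem.Set.ofList [c]) (PySem.Set.ofList l) = PySem.Set.ofList (c :: l) := by
  have h1 : PySem.Set.union (PySem.Set.ofList [c]) (PySem.Set.ofList l)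
      = (PySem.Set.ofList l).foldl PySem.Set.add (PySem.Set.ofList [c]) := rfl
  have h2 : PySem.Set.ofList (c :: l) = l.foldl PySem.Set.add (PySem.Set.ofList [c]) := rfl
  rw [h1, h2, pvFoldl_add_ofList]

-- the layers of B's recursion are exactly the size-indexed combination lists
-- tail helper: shifting the index range by one
theorem pvMapRangeTail {α : Type} (g : Nat → α) (n : Nat) (z : α) (hz : g (n + 1) = z) :
    ((List.range (n + 1)).map g).tail ++ [z]
      = (List.range (n + 1)).map (fun k => g (k + 1)) := by
  conv_lhs => rw [List.range_succ_eq_map]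
  conv_rhs => rw [List.range_succ]
  simp [Function.comp_def, ← hz]

-- the layers of B's recursion are exactly the size-indexed combination lists
theorem pvComboLayers_eq (cols : List String) :
    pvComboLayers cols
      = (List.range (cols.length + 1)).map
          (fun k => (PySem.List.combinations cols k).map PySem.Set.ofList) := by
  induction cols with
  | nil => simp [pvComboLayers, PySem.List.combinations_zero, List.range_succ]
  | cons c t ih =>
    set g : Nat → List (List String) :=
      fun k => (PySem.List.combinations t k).map PySem.Set.ofList with hgdef
    set G : Nat → List (List String) :=
      fun k => (PySem.List.combinations (c :: t) k).map PySem.Set.ofList with hGdef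
    have hGrange : (List.range ((c :: t).length + 1)).map G
        = G 0 :: (List.range (t.length + 1)).map (fun k => G (k + 1)) := by
      rw [List.length_cons, List.range_succ_eq_map]
      simp [Function.comp_def]
    have hrest : pvComboLayers t = (List.range (t.length + 1)).map g := ih
    have hlast : g (t.length + 1) = [] := by
      simp [hgdef, PySem.List.combinations_eq_nil_of_length_lt (by omega)]
    have htail : ((List.range (t.length + 1)).map g).tail ++ [([] : List (List String))]
        = (List.range (t.length + 1)).map (fun k => g (k + 1)) :=
      pvMapRangeTail g t.length [] hlast
    show (pvComboLayers t).headD [] ::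
        ((pvComboLayers t).zip ((pvComboLayers t).tail ++ [[]])).map
          (fun p => p.1.map (fun s => PySem.Set.union (PySem.Set.ofList [c]) s) ++ p.2)
      = (List.range ((c :: t).length + 1)).map G
    rw [hrest, htail, hGrange]
    have hzip : ((List.range (t.length + 1)).map g).zip
          ((List.range (t.length + 1)).map (fun k => g (k + 1)))
        = (List.range (t.length + 1)).map (fun k => (g k, g (k + 1))) := by
      rw [List.zip_map']
    rw [hzip, List.map_map]
    congr 1
    · rw [List.range_succ_eq_map, List.map_cons, List.headD_cons]
      simp [hgdef, hGdef, PySem.List.combinations_zero]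
    · apply List.map_congr_left
      intro k _
      show (g k).map (fun s => PySem.Set.union (PySem.Set.ofList [c]) s) ++ g (k + 1) = G (k + 1)
      rw [hgdef, hGdef]
      simp only [PySem.List.combinations_cons_succ, List.map_append, List.map_map]
      congr 1
      apply List.map_congr_left
      intro combo _
      exact pvUnion_single c combo

-- closed form of A's optional-subset accumulation
theorem pvA_opts (cols : List String) (n : Nat) :
    (PySem.List.pyRange 1 ((n : Int) + 1) 1).foldl
        (fun acc r =>
          (PySem.List.combinations cols r.toNat).foldl
            (fun acc2 combo => acc2 ++ [PySem.Set.ofList combo]) acc)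
        [PySem.Set.ofList []]
      = ([] : List String) ::
          (List.range n).flatMap (fun i => (PySem.List.combinations cols (i + 1)).map PySem.Set.ofList) := by
  induction n with
  | zero =>
    rw [PySem.List.pyRange_one_eq_nil (by norm_num)]
    simp [PySem.Set.ofList]
  | succ n ih =>
    have hsplit : PySem.List.pyRange 1 ((n : Int) + 1 + 1) 1
        = PySem.List.pyRange 1 ((n : Int) + 1) 1 ++ [(n : Int) + 1] := by
      have := PySem.List.pyRange_one_succ_right (a := 1) (b := (n : Int) + 1) (by omega)
      simpa using this
    rw [show ((((n + 1 : Nat)) : Int) + 1) = ((n : Int) + 1 + 1) by push_cast; ring, hsplit,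
      List.foldl_append, ih]
    simp only [List.foldl_cons, List.foldl_nil, PySem.List.foldl_append_singleton_eq_map,
      List.range_succ, List.flatMap_append, List.flatMap_cons, List.flatMap_nil, List.append_nil]
    have : ((n : Int) + 1).toNat = n + 1 := by omega
    rw [this]
    simp

-- A's optional-subset loop produces exactly the flattened layers of B's recursion
theorem pvOpts_eq (cols : List String) :
    (PySem.List.pyRange 1 ((cols.length : Int) + 1) 1).foldl
        (fun acc r =>
          (PySem.List.combinations cols r.toNat).foldl
            (fun acc2 combo => acc2 ++ [PySem.Set.ofList combo]) acc)
        [PySem.Set.ofList []]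
      = (pvComboLayers cols).flatten := by
  rw [pvA_opts, pvComboLayers_eq, ← List.flatMap_def, List.range_succ_eq_map]
  rw [List.flatMap_cons, List.flatMap_map]
  simp [PySem.List.combinations_zero, PySem.Set.ofList]

-- the two exclusion-set literals of A's branches test the same membership
theorem pvFilter_eq (f : String) :
    ((PySem.Set.ofList ["red", "green", "blue", "ir_3", "vis_3"]).contains f)
      = ((PySem.Set.ofList ["red", "green", "blue", "vis_3", "ir_3"]).contains f) := by
  have h1 : PySem.Set.ofList ["red", "green", "blue", "ir_3", "vis_3"]
      = ["red", "green", "blue", "ir_3", "vis_3"] :=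
    PySem.Set.ofList_eq_self_of_nodup (xs := ["red", "green", "blue", "ir_3", "vis_3"]) (by decide)
  have h2 : PySem.Set.ofList ["red", "green", "blue", "vis_3", "ir_3"]
      = ["red", "green", "blue", "vis_3", "ir_3"] :=
    PySem.Set.ofList_eq_self_of_nodup (xs := ["red", "green", "blue", "vis_3", "ir_3"]) (by decide)
  rw [h1, h2]
  simp only [PySem.Set.contains, List.contains_cons, List.contains_nil]
  cases f == "ir_3" <;> cases f == "vis_3" <;> simp

-- B's base list for the "1a"/"1b" branch evaluates to A's nine literals
theorem pvBases1_eq :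
    (pvComboLayers ["red", "green", "blue"]).flatten ++
        [PySem.Set.union (PySem.Set.ofList ["red", "green", "blue"]) (PySem.Set.ofList ["vis_3"])]
      = [PySem.Set.ofList [], PySem.Set.ofList ["red"], PySem.Set.ofList ["green"],
         PySem.Set.ofList ["blue"], PySem.Set.ofList ["red", "green"],
         PySem.Set.ofList ["red", "blue"], PySem.Set.ofList ["green", "blue"],
         PySem.Set.ofList ["red", "green", "blue"],
         PySem.Set.ofList ["red", "green", "blue", "vis_3"]] := by
  decide

-- ===== VERDICT (by name: the statement is the Claim_ definition above) =====
theorem get_invariant_subsets_py_spec : Claim_equal_get_invariant_subsets_py := by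
  intro name features _
  unfold Spec_get_invariant_subsets_py get_invariant_subsets_py get_invariant_subsets_py_alt
  by_cases h1 : (["1a", "1b"] : List String).contains name = true
  · have h3 : (["1a", "1b", "2"] : List String).contains name = true := by
      simp only [List.contains_cons] at h1 ⊢
      cases hb : name == "1a" <;> cases hc : name == "1b" <;> simp_all
    have h2 : name ≠ "2" := by
      intro h; subst h; simp at h1
    simp only [h1, h3, if_true, Bool.not_true, Bool.false_eq_true, if_false, if_neg h2]
    rw [pvOpts_eq, pvBases1_eq]
  · have h1' : (["1a", "1b"] : List String).contains name = false := by
      cases h : (["1a", "1b"] : List String).contains name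
      · rfl
      · exact absurd h h1
    by_cases h2 : name = "2"
    · subst h2
      have hf : (fun f => !((PySem.Set.ofList ["red", "green", "blue", "ir_3", "vis_3"]).contains f))
          = (fun f => !((PySem.Set.ofList ["red", "green", "blue", "vis_3", "ir_3"]).contains f)) := by
        funext f; rw [pvFilter_eq]
      simp only [show (["1a", "1b"] : List String).contains "2" = false from by decide,
        show (!(["1a", "1b", "2"] : List String).contains "2") = false from by decide,
        Bool.false_eq_true, if_false, if_true]
      rw [hf, pvOpts_eq]
    · have h3 : (["1a", "1b", "2"] : List String).contains name = false := by
        simp only [List.contains_cons] at h1' ⊢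
        have : (name == "2") = false := by simp [h2]
        simp_all
      simp only [h1', h3, Bool.not_false, Bool.false_eq_true, if_false, if_neg h2, if_true]
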